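-- pv_equiv track=rewrite | github.com/jay-thakur/geeksforgeeks_py | practice/Basic/count_number_of_equal_pairs_in_string.py | no_of_equal_pairs
-- ===== SOURCE A (Python) =====
-- def no_of_equal_pairs(s):
--     d = {}
--     for i in s:
--         d[i] = d.get(i, 0) + 1
--
--     sums = 0
--     for key, val in d.items():
--         sums += (val * val)
--     return sums
-- ===== SOURCE B (Python) =====
-- def no_of_equal_pairs(s):
--     counts = {}
--     total = 0
--     for c in s:
--         k = counts.get(c, 0) + 1
--         counts[c] = k
--         total += 2 * k - 1
--     return total
-- ===== Notes on version B (the rewrite author's own statement) =====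
-- stated objective: alternative
-- what changed: Fuses counting and aggregation into one pass: instead of building the full count dict and then summing val*val in a second loop over d.items(), B adds 2k-1 when a character reaches its k-th occurrence (the squares accumulated incrementally), eliminating the second loop.
import Mathlib
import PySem

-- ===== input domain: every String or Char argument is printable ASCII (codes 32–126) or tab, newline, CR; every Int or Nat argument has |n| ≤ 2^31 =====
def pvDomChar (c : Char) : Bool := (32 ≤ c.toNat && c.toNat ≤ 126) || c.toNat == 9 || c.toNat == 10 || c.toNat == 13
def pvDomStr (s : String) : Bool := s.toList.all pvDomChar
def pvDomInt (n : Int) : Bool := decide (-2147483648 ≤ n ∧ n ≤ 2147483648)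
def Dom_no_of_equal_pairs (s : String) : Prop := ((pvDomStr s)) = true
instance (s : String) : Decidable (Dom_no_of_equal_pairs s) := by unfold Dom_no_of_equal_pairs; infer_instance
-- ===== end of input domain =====

-- B fuses the count-then-sum-of-squares into one pass using the 2k-1 identity; same results, one loop instead of two.

-- ===== PORT A =====
def no_of_equal_pairs (s : String) : Int :=
  let d := s.toList.foldl (fun d i => d.insert i (d.getD i 0 + 1)) PySem.Dict.empty
  d.items.foldl (fun sums kv => sums + kv.2 * kv.2) 0

-- ===== PORT B =====
def no_of_equal_pairs_alt (s : String) : Int :=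
  (s.toList.foldl (fun st c =>
      let k := st.1.getD c 0 + 1
      (st.1.insert c k, st.2 + (2 * k - 1))) ((PySem.Dict.empty : PySem.Dict Char Int), (0 : Int))).2

-- ===== PRECONDITION & SPEC =====
def Spec_no_of_equal_pairs (s : String) (out : Int) : Prop := out = no_of_equal_pairs_alt s
instance (s : String) (out : Int) : Decidable (Spec_no_of_equal_pairs s out) := by unfold Spec_no_of_equal_pairs; infer_instance

-- ===== CLAIM (what is proved, stated in full; the proofs are below) =====
def Claim_equal_no_of_equal_pairs : Prop := ∀ (s : String), Dom_no_of_equal_pairs s → Spec_no_of_equal_pairs s (no_of_equal_pairs s)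

-- ===== LEMMAS AND PROOFS =====

def pvSumSq (l : List (Char × Int)) : Int := (l.map (fun p => p.2 * p.2)).sum

theorem pv_foldl_sq (l : List (Char × Int)) (a : Int) :
    l.foldl (fun sums kv => sums + kv.2 * kv.2) a = a + pvSumSq l := by
  induction l generalizing a with
  | nil => simp [pvSumSq]
  | cons p t ih =>
    simp only [pvSumSq, List.foldl_cons, List.map_cons, List.sum_cons] at *
    rw [ih]; ring

-- identity map when the key is absent
theorem pv_map_id_of_not_mem (l : List (Char × Int)) (c : Char) (v : Int)
    (h : c ∉ l.map (·.1)) :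
    l.map (fun p => if p.1 == c then (c, v) else p) = l := by
  induction l with
  | nil => rfl
  | cons p t ih =>
    simp only [List.map_cons, List.mem_cons, not_or] at h ⊢
    rcases h with ⟨h1, h2⟩
    rw [if_neg (by simp [beq_iff_eq]; exact fun he => h1 he.symm), ih h2]

theorem pv_sumsq_update (l : List (Char × Int)) (c : Char) (v : Int)
    (hnd : (l.map (·.1)).Nodup) (hm : (c, v) ∈ l) :
    pvSumSq (l.map (fun p => if p.1 == c then (c, v + 1) else p))
      = pvSumSq l + 2 * v + 1 := by
  induction l with
  | nil => simp at hm
  | cons p t ih =>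
    simp only [List.map_cons, List.nodup_cons] at hnd
    rcases hnd with ⟨hp, hnt⟩
    rcases List.mem_cons.mp hm with h | h
    · subst h
      simp only [List.map_cons, pvSumSq, BEq.rfl, if_pos]
      rw [show (t.map (fun p => if p.1 == c then (c, v + 1) else p)) = t from
        pv_map_id_of_not_mem t c (v + 1) hp]
      simp [pvSumSq]; ring
    · have hne : p.1 ≠ c := fun he => hp (he ▸ (List.mem_map.mpr ⟨(c, v), h, rfl⟩) : p.1 ∈ t.map (·.1))
      have hbe : (p.1 == c) = false := by simpa using hne
      simp only [pvSumSq, List.map_cons, List.sum_cons, hbe, Bool.false_eq_true, if_false] at ih ⊢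
      rw [ih hnt h]; ring

theorem pv_sumsq_insert (d : PySem.Dict Char Int) (c : Char)
    (hnd : d.keys.Nodup) :
    pvSumSq (d.insert c (d.getD c 0 + 1)).items
      = pvSumSq d.items + 2 * d.getD c 0 + 1 := by
  by_cases hc : d.contains c = true
  · have hg : (d.get? c).isSome = true := by
      rw [← PySem.Dict.contains_eq_isSome_get?]; exact hc
    rcases Option.isSome_iff_exists.mp hg with ⟨v, hv⟩
    have hgd : d.getD c 0 = v := PySem.Dict.getD_of_get?_eq_some d 0 hv
    have hmem : (c, v) ∈ d.items := PySem.Dict.mem_items_of_get?_eq_some d hv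
    rw [PySem.Dict.items_insert_of_contains _ _ hc, hgd]
    exact pv_sumsq_update d.items c v hnd hmem
  · have hc' : d.contains c = false := by simpa using hc
    rw [PySem.Dict.items_insert_of_not_contains _ _ hc',
        PySem.Dict.getD_of_not_contains _ _ hc']
    simp [pvSumSq]

theorem pv_main (l : List Char) (d : PySem.Dict Char Int) (t : Int)
    (hnd : d.keys.Nodup) (ht : t = pvSumSq d.items) :
    l.foldl (fun st c =>
        let k := st.1.getD c 0 + 1
        (st.1.insert c k, st.2 + (2 * k - 1))) (d, t)
      = (l.foldl (fun d i => d.insert i (d.getD i 0 + 1)) d,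
         pvSumSq (l.foldl (fun d i => d.insert i (d.getD i 0 + 1)) d).items) := by
  induction l generalizing d t with
  | nil => simp [ht]
  | cons c rest ih =>
    simp only [List.foldl_cons]
    rw [ih (d.insert c (d.getD c 0 + 1)) _ (PySem.Dict.nodup_keys_insert _ _ _ hnd)]
    rw [ht, pv_sumsq_insert d c hnd]; ring_nf

-- ===== VERDICT (by name: the statement is the Claim_ definition above) =====
theorem no_of_equal_pairs_spec : Claim_equal_no_of_equal_pairs := by
  intro s _
  unfold Spec_no_of_equal_pairs no_of_equal_pairs no_of_equal_pairs_alt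
  rw [pv_main s.toList PySem.Dict.empty 0 PySem.Dict.nodup_keys_empty (by simp [pvSumSq, PySem.Dict.empty])]
  simp [pv_foldl_sq]
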